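-- pv_equiv track=rewrite | github.com/alexnaiman/Algebra--Generate-all-partition-s-of-a-set | Project 1.py | encodingToEquivalenceRelations
-- ===== SOURCE A (Python) =====
-- def encodingToEquivalenceRelations(encode):
--     setOfEquivalenceRelations = "{"
--     for i in range(len(encode)):
--         for j in range(len(encode)):
--             if encode[j] == encode[i]:
--                 setOfEquivalenceRelations += "(\033[92m" + str(i+1) + "\033[0m,\033[92m" + str(j+1) + "\033[0m), "
--
--     setOfEquivalenceRelations += "\b\b}"
--     return setOfEquivalenceRelations
-- ===== SOURCE B (Python) =====
-- def encodingToEquivalenceRelations(encode):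
--     groups = {}
--     for j, v in enumerate(encode):
--         groups.setdefault(v, []).append(str(j + 1) + "\033[0m), ")
--     parts = ["{"]
--     for i, v in enumerate(encode):
--         head = "(\033[92m" + str(i + 1) + "\033[0m,\033[92m"
--         parts.append(head + head.join(groups[v]))
--     parts.append("\b\b}")
--     return "".join(parts)
-- ===== Notes on version B (the rewrite author's own statement) =====
-- stated objective: faster
-- what changed: One pass groups indices by value into precomputed tail strings, then each row is emitted as a single join with the row head as separator instead of A's O(n^2) all-pairs scan with per-pair string concatenation.
import Mathlib
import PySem

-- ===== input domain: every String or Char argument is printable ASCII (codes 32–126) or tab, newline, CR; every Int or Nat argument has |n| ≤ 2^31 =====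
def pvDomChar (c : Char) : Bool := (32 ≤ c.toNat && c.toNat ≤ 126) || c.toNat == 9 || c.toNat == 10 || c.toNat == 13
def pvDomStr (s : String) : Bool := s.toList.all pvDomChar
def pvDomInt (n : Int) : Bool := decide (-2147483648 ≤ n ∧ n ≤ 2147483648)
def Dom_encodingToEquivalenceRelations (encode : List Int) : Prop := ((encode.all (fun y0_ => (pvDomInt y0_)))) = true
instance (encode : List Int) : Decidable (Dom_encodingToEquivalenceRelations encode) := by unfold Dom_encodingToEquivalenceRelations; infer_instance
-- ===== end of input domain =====

-- B groups indices by value in one pass and emits each row as a single join with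
-- precomputed tail strings, instead of A's all-pairs scan with per-pair concatenation.


-- ===== PORT A =====
-- A's per-pair literal "(\x1b[92m" + str(i+1) + "\x1b[0m,\x1b[92m" + str(j+1) + "\x1b[0m), "
def pvPairChunk (i j : Int) : List Char :=
  "(\x1b[92m".toList ++ PySem.Int.toChars (i + 1) ++ "\x1b[0m,\x1b[92m".toList
    ++ PySem.Int.toChars (j + 1) ++ "\x1b[0m), ".toList

def encodingToEquivalenceRelations (encode : List Int) : String :=
  let s :=
    (PySem.List.pyRange 0 (PySem.List.len encode) 1).foldl (fun acc i =>
      (PySem.List.pyRange 0 (PySem.List.len encode) 1).foldl (fun acc j =>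
        if PySem.List.pyGetD encode j 0 == PySem.List.pyGetD encode i 0
        then acc ++ pvPairChunk i j else acc) acc) "{".toList
  String.ofList (s ++ "\x08\x08}".toList)

-- ===== PORT B =====
-- B's row head "(\x1b[92m" + str(i+1) + "\x1b[0m,\x1b[92m" and tail str(j+1) + "\x1b[0m), "
def pvHead (i : Int) : List Char :=
  "(\x1b[92m".toList ++ PySem.Int.toChars (i + 1) ++ "\x1b[0m,\x1b[92m".toList
def pvTail (j : Int) : List Char :=
  PySem.Int.toChars (j + 1) ++ "\x1b[0m), ".toList

def encodingToEquivalenceRelations_alt (encode : List Int) : String :=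
  let groups : PySem.Dict Int (List (List Char)) :=
    (PySem.List.enumerate encode).foldl
      (fun d p => d.modify p.2 [] (· ++ [pvTail p.1])) PySem.Dict.empty
  let parts : List (List Char) :=
    (PySem.List.enumerate encode).foldl (fun acc p =>
      acc ++ [pvHead p.1 ++ PySem.Chars.join (pvHead p.1) (groups.getD p.2 [])])
      ["{".toList]
  String.ofList (PySem.Chars.join [] (parts ++ ["\x08\x08}".toList]))

-- ===== PRECONDITION & SPEC =====
def Spec_encodingToEquivalenceRelations (encode : List Int) (out : String) : Prop := out = encodingToEquivalenceRelations_alt encode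
instance (encode : List Int) (out : String) : Decidable (Spec_encodingToEquivalenceRelations encode out) := by unfold Spec_encodingToEquivalenceRelations; infer_instance

-- ===== CLAIM (what is proved, stated in full; the proofs are below) =====
def Claim_equal_encodingToEquivalenceRelations : Prop := ∀ (encode : List Int), Dom_encodingToEquivalenceRelations encode → Spec_encodingToEquivalenceRelations encode (encodingToEquivalenceRelations encode)

-- ===== LEMMAS AND PROOFS =====

theorem pv_pairChunk_head_tail (i j : Int) : pvPairChunk i j = pvHead i ++ pvTail j := by
  simp [pvPairChunk, pvHead, pvTail]

-- join with the empty separator is flatten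
theorem pv_join_nil_flatten (ps : List (List Char)) : PySem.Chars.join [] ps = ps.flatten := by
  induction ps with
  | nil => rfl
  | cons h t ih =>
    cases t with
    | nil => simp [PySem.Chars.join, List.intercalate]
    | cons a b =>
      simp only [PySem.Chars.join, List.intercalate, List.intersperse] at *
      simp_all

-- head + join-with-head-separator = every tail prefixed by the head (nonempty tails)
theorem pv_head_join (h : List Char) (ts : List (List Char)) (hne : ts ≠ []) :
    h ++ PySem.Chars.join h ts = ts.flatMap (fun t => h ++ t) := by
  induction ts with
  | nil => exact absurd rfl hne
  | cons t r ih =>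
    cases r with
    | nil => simp [PySem.Chars.join, List.intercalate]
    | cons a b =>
      have := ih (by simp)
      simp only [PySem.Chars.join, List.intercalate, List.intersperse] at *
      simp_all

theorem pv_flatten_flatMap {α : Type} (l : List α) (g : α → List (List Char)) :
    (l.flatMap g).flatten = l.flatMap (fun x => (g x).flatten) := by
  induction l with
  | nil => rfl
  | cons h t ih => simp [List.flatMap_cons, ih]

-- the grouping dict looks up exactly the tails of the same-value index list, in order
theorem pv_groups_getD (encode : List Int) (v : Int) :
    ((PySem.List.enumerate encode).foldl
      (fun d (p : Int × Int) => d.modify p.2 [] (· ++ [pvTail p.1])) PySem.Dict.empty).getD v []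
    = ((PySem.List.pyRange 0 (PySem.List.len encode) 1).filter
        (fun j => PySem.List.pyGetD encode j 0 == v)).map pvTail := by
  have h : (PySem.List.enumerate encode).foldl
      (fun d (p : Int × Int) => d.modify p.2 [] (· ++ [pvTail p.1])) PySem.Dict.empty
      = ((PySem.List.enumerate encode).map (fun p => (p.2, pvTail p.1))).foldl
        (fun d q => d.modify q.1 [] (· ++ [q.2])) PySem.Dict.empty := by
    rw [List.foldl_map]
  rw [h, PySem.Dict.getD_foldl_modify_append,
      PySem.List.enumerate_eq_map_pyRange encode 0]
  simp [List.filter_map, List.map_map, Function.comp_def, pysem]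

-- an if-guarded chunk append is a flatMap over the filtered list
theorem pv_foldl_append_chunk_if {α : Type} (p : α → Bool) (c : α → List Char)
    (l : List α) (acc : List Char) :
    l.foldl (fun acc x => if p x then acc ++ c x else acc) acc
    = acc ++ (l.filter p).flatMap c := by
  induction l generalizing acc with
  | nil => simp
  | cons h t ih =>
    by_cases hp : p h <;> simp [hp, ih]

-- ===== VERDICT (by name: the statement is the Claim_ definition above) =====
theorem encodingToEquivalenceRelations_spec : Claim_equal_encodingToEquivalenceRelations := by
  intro encode _
  unfold Spec_encodingToEquivalenceRelations encodingToEquivalenceRelations encodingToEquivalenceRelations_alt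
  dsimp only
  congr 1
  rw [pv_join_nil_flatten, PySem.List.foldl_append_eq_flatMap]
  -- A's loops
  rw [PySem.List.foldl_congr_mem _ _
        (fun (acc : List Char) i => acc ++
          ((PySem.List.pyRange 0 (PySem.List.len encode) 1).filter
            (fun j => PySem.List.pyGetD encode j 0 == PySem.List.pyGetD encode i 0)).flatMap
          (pvPairChunk i)) _
        (fun acc i _ => pv_foldl_append_chunk_if _ _ _ acc),
      PySem.List.foldl_append_eq_flatMap]
  -- both sides are now flatMaps; compare row by row
  simp only [List.flatten_append, List.flatten_cons, List.flatten_nil,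
    List.append_nil, List.append_assoc, pv_flatten_flatMap]
  congr 1
  rw [PySem.List.enumerate_eq_map_pyRange encode 0, List.flatMap_map]
  congr 1
  apply List.flatMap_congr
  intro i hi
  have hg := pv_groups_getD encode (PySem.List.pyGetD encode i 0)
  rw [PySem.List.enumerate_eq_map_pyRange encode 0] at hg
  dsimp only
  rw [hg]
  have hmem : i ∈ (PySem.List.pyRange 0 (PySem.List.len encode) 1).filter
      (fun j => PySem.List.pyGetD encode j 0 == PySem.List.pyGetD encode i 0) :=
    List.mem_filter.mpr ⟨hi, by simp⟩
  have hne : ((PySem.List.pyRange 0 (PySem.List.len encode) 1).filter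
      (fun j => PySem.List.pyGetD encode j 0 == PySem.List.pyGetD encode i 0)).map pvTail ≠ [] := by
    intro h
    rw [List.map_eq_nil_iff] at h
    exact absurd (h ▸ hmem) (List.not_mem_nil)
  rw [pv_head_join _ _ hne, List.flatMap_map]
  exact List.flatMap_congr (fun j _ => pv_pairChunk_head_tail i j)
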